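-- pv_equiv track=rewrite | github.com/jesselindst/undo | adventOfCode/adv_2.py | homogenity
-- ===== SOURCE A (Python) =====
-- def homogenity(l):
--     state = 0  # 1 is decendign 2 is ascending
--     for i in range(len(l) - 1):
--         if l[i] < l[i + 1]:
--             if state == 1:
--                 return False
--             else:
--                 state = 2
--         elif l[i] > l[i + 1]:
--             if state == 2:
--                 return False
--             else:
--                 state = 1
--     return True
-- ===== SOURCE B (Python) =====
-- def homogenity(l):
--     return all(l[i] <= l[i + 1] for i in range(len(l) - 1)) or \
--            all(l[i] >= l[i + 1] for i in range(len(l) - 1))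
-- ===== Notes on version B (the rewrite author's own statement) =====
-- stated objective: simpler
-- what changed: Replaces A's single stateful direction-tracking loop (state machine with early returns) by two independent stateless monotonicity scans (all non-decreasing OR all non-increasing).
import Mathlib
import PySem

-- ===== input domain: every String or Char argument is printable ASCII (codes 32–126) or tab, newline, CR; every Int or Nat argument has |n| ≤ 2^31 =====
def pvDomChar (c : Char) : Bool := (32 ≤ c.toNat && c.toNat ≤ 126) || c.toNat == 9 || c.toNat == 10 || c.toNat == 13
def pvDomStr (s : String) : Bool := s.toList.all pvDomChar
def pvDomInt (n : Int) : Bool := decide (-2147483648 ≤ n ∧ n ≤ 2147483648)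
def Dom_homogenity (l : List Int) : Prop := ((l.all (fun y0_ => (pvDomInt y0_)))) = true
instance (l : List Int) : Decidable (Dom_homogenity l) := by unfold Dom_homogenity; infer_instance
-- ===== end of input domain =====

-- B replaces A's single stateful direction-tracking pass by two independent
-- monotonicity scans combined with `or` (simpler decomposition; same cost).


-- ===== PORT A =====
-- A's loop over i in range(len(l)-1) comparing l[i] with l[i+1], carrying the
-- direction state (0 = unknown, 1 = descending, 2 = ascending) with early returns.
def homogenityGo : List Int → Int → Bool
  | a :: b :: rest, state =>
    if a < b then
      (if state = 1 then false else homogenityGo (b :: rest) 2)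
    else if a > b then
      (if state = 2 then false else homogenityGo (b :: rest) 1)
    else homogenityGo (b :: rest) state
  | _, _ => true

def homogenity (l : List Int) : Bool := homogenityGo l 0

-- ===== PORT B =====
-- B's two `all(...)` scans over adjacent pairs, combined with `or`.
def homNondec : List Int → Bool
  | a :: b :: rest => decide (a ≤ b) && homNondec (b :: rest)
  | _ => true

def homNoninc : List Int → Bool
  | a :: b :: rest => decide (a ≥ b) && homNoninc (b :: rest)
  | _ => true

def homogenity_alt (l : List Int) : Bool := homNondec l || homNoninc l

-- ===== PRECONDITION & SPEC =====
def Spec_homogenity (l : List Int) (out : Bool) : Prop := out = homogenity_alt l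
instance (l : List Int) (out : Bool) : Decidable (Spec_homogenity l out) := by unfold Spec_homogenity; infer_instance

-- ===== CLAIM (what is proved, stated in full; the proofs are below) =====
def Claim_equal_homogenity : Prop := ∀ (l : List Int), Dom_homogenity l → Spec_homogenity l (homogenity l)

-- ===== LEMMAS AND PROOFS =====
theorem homogenityGo_char (l : List Int) :
    homogenityGo l 2 = homNondec l ∧ homogenityGo l 1 = homNoninc l ∧
      homogenityGo l 0 = (homNondec l || homNoninc l) := by
  induction l with
  | nil => simp [homogenityGo, homNondec, homNoninc]
  | cons a t ih =>
    cases t with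
    | nil => simp [homogenityGo, homNondec, homNoninc]
    | cons b r =>
      obtain ⟨h2, h1, h0⟩ := ih
      refine ⟨?_, ?_, ?_⟩ <;>
        · simp only [homogenityGo, homNondec, homNoninc]
          split_ifs with h1' h2' <;>
            simp_all [show ∀ x y : Int, x < y → ¬ y ≤ x from fun _ _ => by omega,
              show ∀ x y : Int, ¬ x < y → ¬ x > y → x ≤ y ∧ y ≤ x from fun _ _ => by omega,
              le_of_lt]

-- ===== VERDICT (by name: the statement is the Claim_ definition above) =====
theorem homogenity_spec : Claim_equal_homogenity := by
  intro l _
  unfold Spec_homogenity homogenity homogenity_alt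
  exact (homogenityGo_char l).2.2
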